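-- pv_equiv track=rewrite | github.com/Nico-Santos/Fundamento_Informatica | Guia_TP/TP5/ej12.py | extraer_digito
-- ===== SOURCE A (Python) =====
-- def extraer_digito(n, i):
--     if( n // (10 ** i) == 0 and n // (10 ** (i + 1)) == 0):
--         r = -1
--     else:
--         while(i > 0):
--             n //= 10
--             i -= 1
--         r = n % 10
--
--     return r
-- ===== SOURCE B (Python) =====
-- def extraer_digito(n, i):
--     if( n // (10 ** i) == 0 and n // (10 ** (i + 1)) == 0):
--         return -1
--     return n // (10 ** i) % 10
-- ===== Notes on version B (the rewrite author's own statement) =====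
-- stated objective: simpler
-- what changed: The divide-by-10 while loop is replaced by the closed form n // 10**i % 10, using that floor division by positive divisors composes; same -1 guard.
-- outside the precondition, e.g. on extraer_digito(5, -1): A returns 5, B returns 9.0
import Mathlib
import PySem

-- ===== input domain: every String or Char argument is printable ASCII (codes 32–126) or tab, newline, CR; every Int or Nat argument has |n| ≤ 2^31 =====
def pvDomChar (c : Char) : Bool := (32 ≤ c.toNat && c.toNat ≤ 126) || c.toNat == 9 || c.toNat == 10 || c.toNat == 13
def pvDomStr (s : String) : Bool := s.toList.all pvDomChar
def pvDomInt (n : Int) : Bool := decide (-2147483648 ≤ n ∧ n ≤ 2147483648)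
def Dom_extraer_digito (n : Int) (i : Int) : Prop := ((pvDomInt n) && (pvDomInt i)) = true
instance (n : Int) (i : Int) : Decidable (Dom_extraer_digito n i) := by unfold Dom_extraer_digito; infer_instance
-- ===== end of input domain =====

-- B replaces A's divide-by-10 while loop with the closed form n // 10**i % 10 (simpler; same guard).


-- ===== PORT A =====
-- the while loop: while i > 0: n //= 10; i -= 1
def pvLoopA (n : Int) (i : Int) : Int :=
  if h : i > 0 then pvLoopA (PySem.Int.floordiv n 10) (i - 1) else n
termination_by i.toNat
decreasing_by omega

-- '10 ** i' is ported as 10 ^ i.toNat, exact for i ≥ 0 (Pre_ excludes i < 0, where Python computes floats)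
def extraer_digito (n : Int) (i : Int) : Int :=
  if PySem.Int.floordiv n (10 ^ i.toNat) = 0 ∧ PySem.Int.floordiv n (10 ^ (i + 1).toNat) = 0 then
    -1
  else
    PySem.Int.mod (pvLoopA n i) 10

-- ===== PORT B =====
def extraer_digito_alt (n : Int) (i : Int) : Int :=
  if PySem.Int.floordiv n (10 ^ i.toNat) = 0 ∧ PySem.Int.floordiv n (10 ^ (i + 1).toNat) = 0 then
    -1
  else
    PySem.Int.mod (PySem.Int.floordiv n (10 ^ i.toNat)) 10

-- ===== PRECONDITION & SPEC =====
-- Pre_ excludes i < 0, where '10 ** i' is a Python float and both programs produce float-arithmetic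
-- results (A e.g. the int 5 at (5,-1) via a float guard, B the float 9.0), outside the Int convention.
def Pre_extraer_digito (n : Int) (i : Int) : Prop := 0 ≤ i
instance (n : Int) (i : Int) : Decidable (Pre_extraer_digito n i) := by unfold Pre_extraer_digito; infer_instance
def pvWitness_extraer_digito : Int × Int := (352, 1)

def Spec_extraer_digito (n : Int) (i : Int) (out : Int) : Prop := out = extraer_digito_alt n i
instance (n : Int) (i : Int) (out : Int) : Decidable (Spec_extraer_digito n i out) := by unfold Spec_extraer_digito; infer_instance

-- ===== CLAIM (what is proved, stated in full; the proofs are below) =====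
def Claim_equal_extraer_digito : Prop := ∀ (n : Int) (i : Int), Dom_extraer_digito n i → Pre_extraer_digito n i → Spec_extraer_digito n i (extraer_digito n i)

-- ===== LEMMAS AND PROOFS =====
theorem pvLoopA_eq (k : Nat) : ∀ (n : Int), pvLoopA n (k : Int) = PySem.Int.floordiv n (10 ^ k) := by
  induction k with
  | zero =>
    intro n
    rw [pvLoopA]
    simp
  | succ k ih =>
    intro n
    rw [pvLoopA]
    have hk : ((k : Int) + 1 : Int) > 0 := by omega
    have h1 : ((k : Int) + 1 - 1 : Int) = (k : Int) := by ring
    simp only [Int.natCast_succ, hk, dite_true, h1, ih]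
    rw [PySem.Int.floordiv_eq_ediv_of_pos (b := 10) (by omega),
        PySem.Int.floordiv_eq_ediv_of_pos (by positivity),
        PySem.Int.floordiv_eq_ediv_of_pos (by positivity)]
    rw [Int.ediv_ediv_of_nonneg (by omega : (0:Int) ≤ 10)]
    ring_nf

-- ===== VERDICT (by name: the statement is the Claim_ definition above) =====
theorem extraer_digito_spec : Claim_equal_extraer_digito := by
  intro n i _ hpre
  unfold Spec_extraer_digito extraer_digito extraer_digito_alt
  split
  · rfl
  · have hi : (0 : Int) ≤ i := hpre
    have h2 : pvLoopA n i = PySem.Int.floordiv n (10 ^ i.toNat) := by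
      conv_lhs => rw [show i = ((i.toNat : Nat) : Int) by omega]
      exact pvLoopA_eq _ _
    rw [h2]
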